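-- pv_equiv track=rewrite | github.com/aarohisharma5000/Recon-suite | app.py | default_compare_selection
-- ===== SOURCE A (Python) =====
-- def default_compare_selection(common_cols):
--     desired_order = [
--         "Lender Loan Account Number",
--         "loan account number",
--         "Loan Account Number",
--         "CPB",
--         "Target",
--         "Target Rate",
--         "Total BCF",
--         "Total Collection",
--         "Total Target",
--         "loan amount",
--         "Loan amount",
--         "ROI",
--         "TENURE",
--         "Principal Outstanding",
--         "Principal_ Outstanding",
--     ]
--     s = set(common_cols)
--     out = []
--     for d in desired_order:
--         if d in s and d not in out:
--             out.append(d)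
--     return out
-- ===== SOURCE B (Python) =====
-- def default_compare_selection(common_cols):
--     desired_order = [
--         "Lender Loan Account Number",
--         "loan account number",
--         "Loan Account Number",
--         "CPB",
--         "Target",
--         "Target Rate",
--         "Total BCF",
--         "Total Collection",
--         "Total Target",
--         "loan amount",
--         "Loan amount",
--         "ROI",
--         "TENURE",
--         "Principal Outstanding",
--         "Principal_ Outstanding",
--     ]
--     rank = {name: i for i, name in enumerate(desired_order)}
--     common = {c for c in common_cols if c in rank}
--     return sorted(common, key=lambda c: rank[c])
-- ===== Notes on version B (the rewrite author's own statement) =====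
-- stated objective: alternative
-- what changed: Instead of scanning the fixed desired_order list and testing set membership with an in-out dedup check, B builds a name-to-position rank dict, keeps the distinct available columns that have a rank, and returns them sorted by rank.
import Mathlib
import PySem

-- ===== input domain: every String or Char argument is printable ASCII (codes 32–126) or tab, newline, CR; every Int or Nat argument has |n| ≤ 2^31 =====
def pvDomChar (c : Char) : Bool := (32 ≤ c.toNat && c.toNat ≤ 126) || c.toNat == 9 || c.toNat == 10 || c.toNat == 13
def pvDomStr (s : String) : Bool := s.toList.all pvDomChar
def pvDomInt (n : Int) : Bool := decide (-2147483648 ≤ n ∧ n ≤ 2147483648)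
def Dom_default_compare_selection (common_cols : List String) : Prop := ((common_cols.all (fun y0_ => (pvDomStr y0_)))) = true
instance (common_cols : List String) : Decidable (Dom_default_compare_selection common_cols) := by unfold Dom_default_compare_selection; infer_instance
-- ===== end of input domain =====

-- B replaces A's scan-the-fixed-list-with-membership-and-dedup loop by a rank table:
-- keep the distinct available columns that have a rank and sort them by it (objective: alternative, same cost).

-- the fixed column order (shared literal constant of both programs)
def pvDesiredOrder : List String :=
  [ "Lender Loan Account Number",
    "loan account number",
    "Loan Account Number",
    "CPB",
    "Target",
    "Target Rate",
    "Total BCF",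
    "Total Collection",
    "Total Target",
    "loan amount",
    "Loan amount",
    "ROI",
    "TENURE",
    "Principal Outstanding",
    "Principal_ Outstanding" ]

-- ===== PORT A =====
def default_compare_selection (common_cols : List String) : List String :=
  -- s = set(common_cols); for d in desired_order: if d in s and d not in out: out.append(d)
  let s : PySem.Set String := PySem.Set.ofList common_cols
  pvDesiredOrder.foldl
    (fun out d => if PySem.Set.contains s d = true ∧ d ∉ out then out ++ [d] else out) []

-- ===== PORT B =====
-- rank = {name: i for i, name in enumerate(desired_order)}
def pvRank : PySem.Dict String Int :=
  (PySem.List.enumerate pvDesiredOrder).foldl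
    (fun d p => d.insert p.2 p.1) PySem.Dict.empty

def default_compare_selection_alt (common_cols : List String) : List String :=
  -- common = {c for c in common_cols if c in rank}
  let common : PySem.Set String :=
    PySem.Set.ofList (common_cols.filter (fun c => PySem.Dict.contains pvRank c))
  -- sorted(common, key=lambda c: rank[c]) ; rank[c] never raises since every c in common is a key
  PySem.List.sorted common (fun c => PySem.Dict.getD pvRank c 0) false

-- ===== PRECONDITION & SPEC =====
def Spec_default_compare_selection (common_cols : List String) (out : List String) : Prop := out = default_compare_selection_alt common_cols
instance (common_cols : List String) (out : List String) : Decidable (Spec_default_compare_selection common_cols out) := by unfold Spec_default_compare_selection; infer_instance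

-- ===== CLAIM (what is proved, stated in full; the proofs are below) =====
def Claim_equal_default_compare_selection : Prop := ∀ (common_cols : List String), Dom_default_compare_selection common_cols → Spec_default_compare_selection common_cols (default_compare_selection common_cols)

-- ===== LEMMAS AND PROOFS =====

-- concrete facts about the fixed list / rank table
lemma pvDesiredOrder_nodup : pvDesiredOrder.Nodup := by decide

lemma pvRank_keys : (pvRank).keys = pvDesiredOrder := by decide

lemma pvRank_pairwise :
    pvDesiredOrder.Pairwise (fun a b => PySem.Dict.getD pvRank a 0 < PySem.Dict.getD pvRank b 0) := by
  decide

lemma pvContains_iff (c : String) :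
    PySem.Dict.contains pvRank c = true ↔ c ∈ pvDesiredOrder := by
  rw [PySem.Dict.contains_iff_mem_keys, pvRank_keys]

-- A's loop, on a nodup list whose elements are all fresh w.r.t. the accumulator,
-- is filtering by set membership.
lemma loopA (s : PySem.Set String) :
    ∀ (l : List String) (acc : List String), l.Nodup → (∀ d ∈ l, d ∉ acc) →
      l.foldl (fun out d => if PySem.Set.contains s d = true ∧ d ∉ out then out ++ [d] else out) acc
        = acc ++ l.filter (fun d => PySem.Set.contains s d) := by
  intro l
  induction l with
  | nil => intro acc _ _; simp
  | cons d t ih =>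
    intro acc hnd hfresh
    simp only [List.foldl_cons, List.filter_cons]
    by_cases hs : PySem.Set.contains s d = true
    · rw [if_pos ⟨hs, hfresh d (by simp)⟩, hs]
      rw [ih (acc ++ [d]) hnd.of_cons]
      · simp
      · intro e he
        simp only [List.mem_append, List.mem_singleton]
        rintro (h1 | rfl)
        · exact hfresh e (by simp [he]) h1
        · exact (List.nodup_cons.mp hnd).1 he
    · rw [if_neg (by tauto), if_neg (by simpa using hs)]
      exact ih acc hnd.of_cons (fun e he => hfresh e (by simp [he]))

-- uniqueness of the sorted order: a ≤-sorted list equals any strictly-sorted permutation of it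
lemma eq_of_perm_sorted {α : Type} (key : α → Int) :
    ∀ (l₂ l₁ : List α), l₁.Perm l₂ →
      l₁.Pairwise (fun a b => key a ≤ key b) →
      l₂.Pairwise (fun a b => key a < key b) → l₁ = l₂ := by
  intro l₂
  induction l₂ with
  | nil => intro l₁ hp _ _; simpa using hp.eq_nil
  | cons b s ih =>
    intro l₁ hp h1 h2
    match l₁ with
    | [] => exact absurd hp.symm (by simp)
    | a :: t =>
      have hab : a = b := by
        by_contra hne
        have hbt : b ∈ t := by
          have : b ∈ a :: t := hp.mem_iff.mpr (by simp)
          rcases List.mem_cons.mp this with h | h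
          · exact absurd h.symm hne
          · exact h
        have has : a ∈ s := by
          have : a ∈ b :: s := hp.mem_iff.mp (by simp)
          simpa [hne] using this
        have h1' : key a ≤ key b := (List.pairwise_cons.mp h1).1 b hbt
        have h2' : key b < key a := (List.pairwise_cons.mp h2).1 a has
        omega
      subst hab
      have := ih t (hp.cons_inv) (List.pairwise_cons.mp h1).2 (List.pairwise_cons.mp h2).2
      rw [this]

theorem default_compare_selection_eq (common_cols : List String) :
    default_compare_selection common_cols = default_compare_selection_alt common_cols := by
  unfold default_compare_selection default_compare_selection_alt
  set s : PySem.Set String := PySem.Set.ofList common_cols with hs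
  set key : String → Int := fun c => PySem.Dict.getD pvRank c 0 with hkey
  set F : List String := pvDesiredOrder.filter (fun d => PySem.Set.contains s d) with hF
  set C : List String :=
    PySem.Set.ofList (common_cols.filter (fun c => PySem.Dict.contains pvRank c)) with hC
  -- A's side reduces to the filter F
  rw [loopA s pvDesiredOrder [] pvDesiredOrder_nodup (by simp), List.nil_append]
  -- B's side: sorted C key = F, by uniqueness of the strictly key-sorted order
  have hmemC : ∀ x, x ∈ C ↔ (x ∈ common_cols ∧ x ∈ pvDesiredOrder) := by
    intro x
    rw [hC, PySem.Set.mem_ofList, List.mem_filter]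
    simp [pvContains_iff]
  have hmemF : ∀ x, x ∈ F ↔ (x ∈ common_cols ∧ x ∈ pvDesiredOrder) := by
    intro x
    rw [hF, List.mem_filter]
    constructor
    · rintro ⟨hd, hc⟩
      refine ⟨?_, hd⟩
      have := PySem.Set.mem_ofList common_cols x
      exact this.mp (by simpa [hs, PySem.Set.contains_iff] using hc)
    · rintro ⟨hc, hd⟩
      refine ⟨hd, ?_⟩
      simpa [hs, PySem.Set.contains_iff, PySem.Set.mem_ofList] using hc
  have hpermCF : C.Perm F := by
    rw [List.perm_ext_iff_of_nodup (by exact PySem.Set.nodup_ofList _)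
      (pvDesiredOrder_nodup.filter _)]
    intro x; rw [hmemC, hmemF]
  have hperm : (PySem.List.sorted C key false).Perm F :=
    (PySem.List.sorted_perm C key false).trans hpermCF
  have hFlt : F.Pairwise (fun a b => key a < key b) :=
    List.Pairwise.sublist List.filter_sublist pvRank_pairwise
  exact (eq_of_perm_sorted key F _ hperm (PySem.List.sorted_pairwise C key) hFlt).symm

-- ===== VERDICT (by name: the statement is the Claim_ definition above) =====
theorem default_compare_selection_spec : Claim_equal_default_compare_selection := by
  intro common_cols _
  unfold Spec_default_compare_selection
  exact default_compare_selection_eq common_cols
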